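-- pv_equiv track=rewrite | github.com/immanuelweber/artifive-potsdam | artifive_potsdam_tools/visualization.py | __get_translations
-- ===== SOURCE A (Python) =====
-- def __get_translations(h, w, n_samples, n_cols, padding):
--     txs, tys = [], []
--     j = -1
--     for i in range(n_samples):
--         txs.append((w + padding) * (i % n_cols))
--         if i % n_cols == 0:
--             j += 1
--         tys.append((h + padding) * j)
--     return txs, tys
-- ===== SOURCE B (Python) =====
-- def __get_translations(h, w, n_samples, n_cols, padding):
--     if n_samples <= 0:
--         return [], []
--     cell_w = w + padding
--     cell_h = h + padding
--     n_rows = -(-n_samples // n_cols)  # ceil division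
--     txs, tys = [], []
--     for r in range(n_rows):
--         row_len = min(n_cols, n_samples - r * n_cols)
--         for c in range(row_len):
--             txs.append(cell_w * c)
--             tys.append(cell_h * r)
--     return txs, tys
-- ===== Notes on version B (the rewrite author's own statement) =====
-- stated objective: alternative
-- what changed: B traverses the grid structurally with nested row/column loops (computing the number of rows once by ceiling division) instead of A's single flat-index loop with per-element modulo and a running row counter.
-- outside the precondition, e.g. on __get_translations(1, 1, 3, -2, 0): A returns ([0, -1, 0], [0, 0, 1]), B returns ([], []); on __get_translations(1, 1, 3, 0, 0): A raises ZeroDivisionError, B raises ZeroDivisionError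
import Mathlib
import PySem

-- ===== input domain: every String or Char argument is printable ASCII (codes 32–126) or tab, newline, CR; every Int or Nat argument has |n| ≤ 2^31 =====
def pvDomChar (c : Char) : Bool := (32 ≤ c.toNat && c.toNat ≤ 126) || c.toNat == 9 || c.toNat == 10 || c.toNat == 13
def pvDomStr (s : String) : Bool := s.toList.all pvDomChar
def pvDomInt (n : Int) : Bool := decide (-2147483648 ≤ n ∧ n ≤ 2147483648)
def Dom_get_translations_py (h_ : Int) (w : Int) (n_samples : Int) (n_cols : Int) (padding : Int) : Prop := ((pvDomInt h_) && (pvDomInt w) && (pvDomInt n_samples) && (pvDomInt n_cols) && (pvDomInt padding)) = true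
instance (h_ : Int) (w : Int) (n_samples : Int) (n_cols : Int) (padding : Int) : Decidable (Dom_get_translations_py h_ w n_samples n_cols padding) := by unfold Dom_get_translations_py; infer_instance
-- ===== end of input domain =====

-- B lays the grid out structurally with nested row/column loops (rows from a ceiling division) instead of A's flat-index loop with modulo and a running counter: alternative, not faster.

-- ===== PORT A =====
def get_translations_py (h_ : Int) (w : Int) (n_samples : Int) (n_cols : Int) (padding : Int) : List Int × List Int :=
  let st := (PySem.List.pyRange 0 n_samples 1).foldl
    (fun (s : List Int × List Int × Int) i =>
      let txs := s.1 ++ [(w + padding) * PySem.Int.mod i n_cols]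
      let j := if PySem.Int.mod i n_cols = 0 then s.2.2 + 1 else s.2.2
      let tys := s.2.1 ++ [(h_ + padding) * j]
      (txs, tys, j)) ([], [], -1)
  (st.1, st.2.1)

-- ===== PORT B =====
def get_translations_py_alt (h_ : Int) (w : Int) (n_samples : Int) (n_cols : Int) (padding : Int) : List Int × List Int :=
  if n_samples ≤ 0 then ([], [])
  else
    let cell_w := w + padding
    let cell_h := h_ + padding
    let n_rows := -(PySem.Int.floordiv (-n_samples) n_cols)
    (PySem.List.pyRange 0 n_rows 1).foldl
      (fun (s : List Int × List Int) r =>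
        let row_len := min n_cols (n_samples - r * n_cols)
        (PySem.List.pyRange 0 row_len 1).foldl
          (fun (s : List Int × List Int) c => (s.1 ++ [cell_w * c], s.2 ++ [cell_h * r])) s)
      ([], [])

-- ===== PRECONDITION & SPEC =====
-- Pre_ excludes n_samples > 0 with n_cols = 0 (both A and B raise ZeroDivisionError) and
-- n_samples > 0 with n_cols < 0: a negative column count is outside the natural grid domain, and on
-- that accidental corner A's flat modulo loop and B's row decomposition legitimately disagree (neither is specified).
def Pre_get_translations_py (h_ : Int) (w : Int) (n_samples : Int) (n_cols : Int) (padding : Int) : Prop :=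
  n_samples ≤ 0 ∨ 0 < n_cols
instance (h_ : Int) (w : Int) (n_samples : Int) (n_cols : Int) (padding : Int) : Decidable (Pre_get_translations_py h_ w n_samples n_cols padding) := by unfold Pre_get_translations_py; infer_instance
def pvWitness_get_translations_py : Int × Int × Int × Int × Int := (2, 3, 5, 2, 1)

def Spec_get_translations_py (h_ : Int) (w : Int) (n_samples : Int) (n_cols : Int) (padding : Int) (out : List Int × List Int) : Prop := out = get_translations_py_alt h_ w n_samples n_cols padding
instance (h_ : Int) (w : Int) (n_samples : Int) (n_cols : Int) (padding : Int) (out : List Int × List Int) : Decidable (Spec_get_translations_py h_ w n_samples n_cols padding out) := by unfold Spec_get_translations_py; infer_instance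

-- ===== CLAIM (what is proved, stated in full; the proofs are below) =====
def Claim_equal_get_translations_py : Prop := ∀ (h_ : Int) (w : Int) (n_samples : Int) (n_cols : Int) (padding : Int), Dom_get_translations_py h_ w n_samples n_cols padding → Pre_get_translations_py h_ w n_samples n_cols padding → Spec_get_translations_py h_ w n_samples n_cols padding (get_translations_py h_ w n_samples n_cols padding)

-- ===== LEMMAS AND PROOFS =====

-- For a positive divisor, the floor quotient steps by 1 exactly at multiples of c.
lemma floordiv_step (c : Int) (hc : 0 < c) (n : Int) :
    PySem.Int.floordiv n c
      = PySem.Int.floordiv (n - 1) c + (if PySem.Int.mod n c = 0 then 1 else 0) := by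
  have h1 := PySem.Int.floordiv_mul_add_mod n c
  have h2 : 0 ≤ PySem.Int.mod n c := PySem.Int.mod_nonneg n hc
  have h3 : PySem.Int.mod n c < c := PySem.Int.mod_lt n hc
  split_ifs with h
  · have hq : PySem.Int.floordiv (n - 1) c = PySem.Int.floordiv n c - 1 := by
      rw [PySem.Int.floordiv_eq_iff_of_pos hc]
      constructor <;> nlinarith [h1, h]
    rw [hq]; ring
  · have h4 : 1 ≤ PySem.Int.mod n c := by omega
    have hq : PySem.Int.floordiv (n - 1) c = PySem.Int.floordiv n c := by
      rw [PySem.Int.floordiv_eq_iff_of_pos hc]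
      constructor <;> nlinarith [h1, h4, h3]
    rw [hq]; ring

-- floor(-1 / c) = -1 for 0 < c (A's initial j = -1 fits the uniform invariant).
lemma floordiv_neg_one (c : Int) (hc : 0 < c) : PySem.Int.floordiv (-1) c = -1 := by
  rw [PySem.Int.floordiv_eq_iff_of_pos hc]
  constructor <;> nlinarith

-- Quotient and remainder of k*c + t for 0 ≤ t < c.
lemma floordiv_base (c k t : Int) (hc : 0 < c) (h0 : 0 ≤ t) (ht : t < c) :
    PySem.Int.floordiv (k * c + t) c = k := by
  rw [PySem.Int.floordiv_eq_iff_of_pos hc]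
  constructor <;> nlinarith

lemma mod_base (c k t : Int) (hc : 0 < c) (h0 : 0 ≤ t) (ht : t < c) :
    PySem.Int.mod (k * c + t) c = t := by
  have h1 := PySem.Int.floordiv_mul_add_mod (k * c + t) c
  rw [floordiv_base c k t hc h0 ht] at h1
  omega

-- Loop invariant for A's fold over range(n): accumulated lists are the closed-form maps and j = (n-1) // c.
lemma loopA_inv (h_ w padding c : Int) (hc : 0 < c) (n : Nat) :
    (PySem.List.pyRange 0 (n : Int) 1).foldl
      (fun (s : List Int × List Int × Int) i =>
        let txs := s.1 ++ [(w + padding) * PySem.Int.mod i c]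
        let j := if PySem.Int.mod i c = 0 then s.2.2 + 1 else s.2.2
        let tys := s.2.1 ++ [(h_ + padding) * j]
        (txs, tys, j)) ([], [], -1)
    = ((PySem.List.pyRange 0 (n : Int) 1).map (fun i => (w + padding) * PySem.Int.mod i c),
       (PySem.List.pyRange 0 (n : Int) 1).map (fun i => (h_ + padding) * PySem.Int.floordiv i c),
       PySem.Int.floordiv ((n : Int) - 1) c) := by
  induction n with
  | zero =>
      simp [PySem.List.pyRange_one_eq_nil (by omega : (0:Int) ≤ 0), floordiv_neg_one c hc]
  | succ m ih =>
      have hsplit : PySem.List.pyRange 0 ((m : Int) + 1) 1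
          = PySem.List.pyRange 0 (m : Int) 1 ++ [(m : Int)] :=
        PySem.List.pyRange_one_succ_right (by positivity)
      have hcast : ((m + 1 : Nat) : Int) = (m : Int) + 1 := by push_cast; ring
      rw [hcast, hsplit, List.foldl_append, ih, List.map_append, List.map_append]
      have hstep := floordiv_step c hc (m : Int)
      simp only [List.foldl_cons, List.foldl_nil, List.map_cons, List.map_nil]
      have hj : (if PySem.Int.mod (m : Int) c = 0
            then PySem.Int.floordiv ((m : Int) - 1) c + 1
            else PySem.Int.floordiv ((m : Int) - 1) c) = PySem.Int.floordiv (m : Int) c := by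
        split_ifs with h <;> simp [h] at hstep <;> omega
      simp only [hj]
      have hm1 : (m : Int) + 1 - 1 = (m : Int) := by ring
      rw [hm1]

-- B's inner loop just appends the mapped row to both accumulators.
lemma inner_fold (f g : Int → Int) (l : List Int) (a b : List Int) :
    l.foldl (fun (s : List Int × List Int) c => (s.1 ++ [f c], s.2 ++ [g c])) (a, b)
      = (a ++ l.map f, b ++ l.map g) := by
  induction l generalizing a b with
  | nil => simp
  | cons x xs ih => simp [ih]

-- Loop invariant for B's outer fold over k rows: the accumulators are the closed-form maps over [0, min(k*c, n)).
lemma loopB_inv (h_ w padding c n : Int) (hc : 0 < c) (k : Nat) :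
    (PySem.List.pyRange 0 (k : Int) 1).foldl
      (fun (s : List Int × List Int) r =>
        (PySem.List.pyRange 0 (min c (n - r * c)) 1).foldl
          (fun (s : List Int × List Int) t => (s.1 ++ [(w + padding) * t], s.2 ++ [(h_ + padding) * r])) s)
      ([], [])
    = ((PySem.List.pyRange 0 (min ((k : Int) * c) n) 1).map (fun i => (w + padding) * PySem.Int.mod i c),
       (PySem.List.pyRange 0 (min ((k : Int) * c) n) 1).map (fun i => (h_ + padding) * PySem.Int.floordiv i c)) := by
  induction k with
  | zero => simp [PySem.List.pyRange_one_eq_nil (le_refl (0:Int)),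
      PySem.List.pyRange_one_eq_nil (min_le_of_left_le (le_refl (0:Int)))]
  | succ m ih =>
      have hcast : ((m + 1 : Nat) : Int) = (m : Int) + 1 := by push_cast; ring
      have hsplit : PySem.List.pyRange 0 ((m : Int) + 1) 1
          = PySem.List.pyRange 0 (m : Int) 1 ++ [(m : Int)] :=
        PySem.List.pyRange_one_succ_right (by positivity)
      rw [hcast, hsplit, List.foldl_append, ih]
      simp only [List.foldl_cons, List.foldl_nil]
      set L := min (c) (n - (m : Int) * c) with hL
      rw [inner_fold]
      by_cases hend : n ≤ (m : Int) * c
      · -- past the last row: the inner range is empty and the bound is already n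
        have hLnp : L ≤ 0 := le_trans (min_le_right _ _) (by omega)
        have hmin1 : min ((m : Int) * c) n = n := min_eq_right hend
        have hmin2 : min (((m : Int) + 1) * c) n = n := min_eq_right (by nlinarith)
        rw [PySem.List.pyRange_one_eq_nil hLnp]
        simp [hmin1, hmin2]
      · -- live row m: its entries are the closed-form values at indices m*c .. min((m+1)*c, n)
        replace hend : (m : Int) * c < n := by omega
        have h0L : (0 : Int) ≤ L := le_min (le_of_lt hc) (by omega)
        have hmin1 : min ((m : Int) * c) n = (m : Int) * c := min_eq_left (le_of_lt hend)
        have hLc : L ≤ c := min_le_left _ _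
        have hmap1 : (PySem.List.pyRange 0 L 1).map (fun t => (w + padding) * t)
            = (PySem.List.pyRange ((m : Int) * c) ((m : Int) * c + L) 1).map
                (fun i => (w + padding) * PySem.Int.mod i c) := by
          rw [PySem.List.pyRange_one 0 L, PySem.List.pyRange_one ((m : Int) * c) _]
          have : ((m : Int) * c + L - (m : Int) * c) = L - 0 := by ring
          rw [this]
          rw [List.map_map, List.map_map]
          refine List.map_congr_left ?_
          intro t ht
          have htL : (t : Int) < L := by
            have := List.mem_range.mp ht
            omega
          have ht0 : (0 : Int) ≤ (t : Int) := by positivity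
          simp only [Function.comp]
          rw [show (m : Int) * c + (t : Int) = (m : Int) * c + (t : Int) from rfl,
              mod_base c (m : Int) (t : Int) hc ht0 (lt_of_lt_of_le htL hLc)]
          simp
        have hmap2 : (PySem.List.pyRange 0 L 1).map (fun _ => (h_ + padding) * (m : Int))
            = (PySem.List.pyRange ((m : Int) * c) ((m : Int) * c + L) 1).map
                (fun i => (h_ + padding) * PySem.Int.floordiv i c) := by
          rw [PySem.List.pyRange_one 0 L, PySem.List.pyRange_one ((m : Int) * c) _]
          have : ((m : Int) * c + L - (m : Int) * c) = L - 0 := by ring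
          rw [this]
          rw [List.map_map, List.map_map]
          refine List.map_congr_left ?_
          intro t ht
          have htL : (t : Int) < L := by
            have := List.mem_range.mp ht
            omega
          have ht0 : (0 : Int) ≤ (t : Int) := by positivity
          simp only [Function.comp]
          rw [floordiv_base c (m : Int) (t : Int) hc ht0 (lt_of_lt_of_le htL hLc)]
        have hjoin : PySem.List.pyRange 0 (min (((m : Int) + 1) * c) n) 1
            = PySem.List.pyRange 0 ((m : Int) * c) 1
              ++ PySem.List.pyRange ((m : Int) * c) ((m : Int) * c + L) 1 := by
          have hLval : (m : Int) * c + L = min (((m : Int) + 1) * c) n := by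
            simp [hL]
            rcases le_total c (n - (m : Int) * c) with h | h
            · rw [min_eq_left h, min_eq_left (by nlinarith)]; ring
            · rw [min_eq_right h, min_eq_right (by nlinarith)]; ring
          rw [hLval]
          exact PySem.List.pyRange_one_append 0 ((m : Int) * c) _
            (by positivity) (by rw [← hLval]; linarith)
        rw [hmin1, hjoin, List.map_append, List.map_append, hmap1, hmap2]

-- For n > 0 < c, the ceiling row count R = -((-n) // c) satisfies 0 < R and n ≤ R*c < n + c.
lemma ceil_rows (n c : Int) (hn : 0 < n) (hc : 0 < c) :
    0 < -(PySem.Int.floordiv (-n) c) ∧ n ≤ -(PySem.Int.floordiv (-n) c) * c := by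
  set q := -(PySem.Int.floordiv (-n) c) with hq
  have h := (PySem.Int.neg_floordiv_neg_eq_iff_of_pos (a := n) (b := c) (q := q) hc).mpr
  have h2 : -(PySem.Int.floordiv (-n) c) = q := rfl
  have h3 := (PySem.Int.neg_floordiv_neg_eq_iff_of_pos (a := n) (b := c) (q := q) hc).mp h2
  constructor
  · nlinarith [h3.1, h3.2]
  · exact h3.2

-- ===== VERDICT (by name: the statement is the Claim_ definition above) =====
theorem get_translations_py_spec : Claim_equal_get_translations_py := by
  intro h_ w n_samples n_cols padding _hdom hpre
  unfold Spec_get_translations_py get_translations_py get_translations_py_alt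
  by_cases hle : n_samples ≤ 0
  · rw [PySem.List.pyRange_one_eq_nil hle]; simp [hle]
  · have hc : 0 < n_cols := by rcases hpre with h | h <;> omega
    replace hle : 0 < n_samples := by omega
    simp only [if_neg (by omega : ¬ n_samples ≤ 0)]
    have hn : n_samples = ((n_samples.toNat : Nat) : Int) := by omega
    obtain ⟨hR0, hRn⟩ := ceil_rows n_samples n_cols hle hc
    set R := -(PySem.Int.floordiv (-n_samples) n_cols) with hRdef
    have hRcast : R = ((R.toNat : Nat) : Int) := by omega
    have hB := loopB_inv h_ w padding n_cols n_samples hc R.toNat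
    rw [← hRcast] at hB
    have hminR : min (R * n_cols) n_samples = n_samples := by omega
    rw [hminR] at hB
    rw [hn, loopA_inv h_ w padding n_cols hc n_samples.toNat]
    rw [← hn]
    simp only []
    rw [hB]
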